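-- pv_equiv track=rewrite | github.com/bbara04/Plex-Cleaner-old | reader/plex_reader.py | fileNameConv
-- ===== SOURCE A (Python) =====
-- def fileNameConv(filename):
--     filenamesplit = filename.split('/')
--     filenamesplit.pop(-1)
--     filenameFixed = ""
--     for str in filenamesplit:
--         filenameFixed += str
--         filenameFixed += '/'
--     return filenameFixed[0:-1]
-- ===== SOURCE B (Python) =====
-- def fileNameConv(filename):
--     idx = filename.rfind('/')
--     if idx == -1:
--         return ""
--     return filename[:idx]
-- ===== Notes on version B (the rewrite author's own statement) =====
-- stated objective: idiomatic
-- what changed: Replaces split-into-components, pop, rebuild-with-separators and trailing-slice with a single rfind of the last '/' and one slice; no intermediate list of parts is built.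
import Mathlib
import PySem

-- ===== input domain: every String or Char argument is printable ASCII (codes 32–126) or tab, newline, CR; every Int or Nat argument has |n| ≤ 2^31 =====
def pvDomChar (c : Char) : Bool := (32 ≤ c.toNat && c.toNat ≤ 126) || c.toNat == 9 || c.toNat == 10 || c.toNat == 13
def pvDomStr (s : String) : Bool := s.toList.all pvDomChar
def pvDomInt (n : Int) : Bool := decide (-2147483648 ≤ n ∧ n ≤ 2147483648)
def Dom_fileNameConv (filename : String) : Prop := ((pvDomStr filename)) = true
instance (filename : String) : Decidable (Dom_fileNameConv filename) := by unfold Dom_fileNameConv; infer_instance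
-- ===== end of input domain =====

-- B replaces split/pop/rebuild by one rfind of the last '/' and a single slice (idiomatic; no list of parts).

-- ===== PORT A =====
def fileNameConv (filename : String) : String :=
  let filenamesplit := (PySem.Str.split? filename "/").getD []
  match PySem.List.pop? filenamesplit (-1) with
  | none => ""   -- unreachable: split('/') always yields a nonempty list
  | some (_, rest) =>
      let filenameFixed := rest.foldl (fun acc s => (acc ++ s) ++ "/") ""
      PySem.Str.slice filenameFixed (some 0) (some (-1))

-- ===== PORT B =====
def fileNameConv_alt (filename : String) : String :=
  let idx := PySem.Str.rfind filename "/"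
  if idx = -1 then "" else PySem.Str.slice filename none (some idx)

-- ===== PRECONDITION & SPEC =====
def Spec_fileNameConv (filename : String) (out : String) : Prop := out = fileNameConv_alt filename
instance (filename : String) (out : String) : Decidable (Spec_fileNameConv filename out) := by unfold Spec_fileNameConv; infer_instance

-- ===== CLAIM (what is proved, stated in full; the proofs are below) =====
def Claim_equal_fileNameConv : Prop := ∀ (filename : String), Dom_fileNameConv filename → Spec_fileNameConv filename (fileNameConv filename)

-- ===== LEMMAS AND PROOFS =====

/-- The segment of `cs` strictly before the last `'/'` (or `[]` if there is none). -/
def chop : List Char → List Char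
  | [] => []
  | c :: rest => if '/' ∈ rest then c :: chop rest else []

/-- Plain accumulator model of `PySem.Chars.splitOn cs ['/']`. -/
def psplit : List Char → List Char → List (List Char)
  | [], cur => [cur.reverse]
  | c :: rest, cur => if c = '/' then cur.reverse :: psplit rest [] else psplit rest (c :: cur)

lemma psplit_ne_nil : ∀ (cs cur : List Char), psplit cs cur ≠ [] := by
  intro cs
  induction cs with
  | nil => intro cur; simp [psplit]
  | cons c rest ih =>
      intro cur
      by_cases hc : c = '/' <;> simp [psplit, hc]
      exact ih _

lemma psplit_no_sep : ∀ (cs : List Char), '/' ∉ cs → ∀ cur, psplit cs cur = [cur.reverse ++ cs] := by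
  intro cs
  induction cs with
  | nil => intro _ cur; simp [psplit]
  | cons c rest ih =>
      intro h cur
      have hc : c ≠ '/' := fun h' => h (by simp [h'])
      have hr : '/' ∉ rest := fun h' => h (by simp [h'])
      simp [psplit, hc, ih hr, List.append_assoc]

lemma splitOn_go_spec : ∀ (fuel : ℕ) (l cur : List Char) (acc : List (List Char)),
    l.length ≤ fuel →
    PySem.Chars.splitOn.go ['/'] fuel l cur acc = acc.reverse ++ psplit l cur := by
  intro fuel
  induction fuel with
  | zero =>
      intro l cur acc h
      have : l = [] := List.eq_nil_of_length_eq_zero (Nat.le_zero.mp h)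
      subst this
      simp [PySem.Chars.splitOn.go, psplit]
  | succ n ih =>
      intro l cur acc h
      cases l with
      | nil => simp [PySem.Chars.splitOn.go, psplit]
      | cons c rest =>
          by_cases hc : c = '/'
          · subst hc
            have := ih rest [] (cur.reverse :: acc) (by simpa using Nat.lt_succ_iff.mp (by simpa using h))
            simp [PySem.Chars.splitOn.go, List.isPrefixOf, psplit, this]
          · have := ih rest (c :: cur) acc (by simpa using Nat.lt_succ_iff.mp (by simpa using h))
            simp [PySem.Chars.splitOn.go, List.isPrefixOf, hc, Ne.symm hc, psplit, this]

lemma splitOn_spec (cs : List Char) : PySem.Chars.splitOn cs ['/'] = psplit cs [] := by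
  have := splitOn_go_spec (cs.length + 1) cs [] [] (by omega)
  simpa [PySem.Chars.splitOn] using this

lemma psplit_two_le : ∀ (cs : List Char), '/' ∈ cs → ∀ cur, 2 ≤ (psplit cs cur).length := by
  intro cs
  induction cs with
  | nil => intro h; cases h
  | cons c rest ih =>
      intro h cur
      by_cases hc : c = '/'
      · have h1 := psplit_ne_nil rest []
        simp [psplit, hc]
        exact Nat.one_le_iff_ne_zero.mpr (by simpa [List.length_eq_zero_iff] using h1)
      · have hr : '/' ∈ rest := by
          rcases List.mem_cons.mp h with h' | h'
          · exact absurd h'.symm hc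
          · exact h'
        simpa [psplit, hc] using ih hr (c :: cur)

lemma flatten_slash_ne_nil (l : List (List Char)) (h : l ≠ []) :
    (l.map (· ++ ['/'])).flatten ≠ [] := by
  cases l with
  | nil => exact absurd rfl h
  | cons a t => simp

/-- Main A-side characterisation. -/
lemma gA_spec : ∀ (cs cur : List Char),
    (((psplit cs cur).dropLast.map (· ++ ['/'])).flatten).dropLast
      = if '/' ∈ cs then cur.reverse ++ chop cs else [] := by
  intro cs
  induction cs with
  | nil => intro cur; simp [psplit]
  | cons c rest ih =>
      intro cur
      by_cases hc : c = '/'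
      · subst hc
        have hne := psplit_ne_nil rest []
        rw [show psplit ('/' :: rest) cur = cur.reverse :: psplit rest [] by simp [psplit]]
        rw [List.dropLast_cons_of_ne_nil hne]
        by_cases hr : '/' ∈ rest
        · have hF : ((psplit rest []).dropLast.map (· ++ ['/'])).flatten ≠ [] := by
            apply flatten_slash_ne_nil
            have h2 := psplit_two_le rest hr []
            intro hnil
            have := congrArg List.length hnil
            simp [List.length_dropLast] at this
            omega
          have ihr := ih ([] : List Char)
          simp only [hr, if_true, List.reverse_nil, List.nil_append] at ihr
          simp only [List.map_cons, List.flatten_cons]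
          rw [List.dropLast_append_of_ne_nil hF, ihr]
          simp [chop, hr, List.append_assoc]
        · rw [psplit_no_sep rest hr []]
          simp [chop, hr]
      · rw [show psplit (c :: rest) cur = psplit rest (c :: cur) by simp [psplit, hc]]
        rw [ih (c :: cur)]
        have hmem : ('/' ∈ c :: rest) ↔ ('/' ∈ rest) := by
          constructor
          · intro h; rcases List.mem_cons.mp h with h' | h'
            · exact absurd h'.symm hc
            · exact h'
          · intro h; exact List.mem_cons_of_mem _ h
        by_cases hr : '/' ∈ rest
        · simp [hmem, hr, chop, List.append_assoc]
        · simp [hmem, hr]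

lemma fold_toList : ∀ (l : List (List Char)) (init : String),
    ((l.map String.ofList).foldl (fun acc s => (acc ++ s) ++ "/") init).toList
      = init.toList ++ (l.map (· ++ ['/'])).flatten := by
  intro l
  induction l with
  | nil => intro init; simp
  | cons a t ih =>
      intro init
      simp only [List.map_cons, List.foldl_cons, List.flatten_cons, List.map_cons]
      rw [ih]
      simp [List.append_assoc]

lemma string_toList_inj {a b : String} (h : a.toList = b.toList) : a = b := by
  have := congrArg String.ofList h
  simpa using this

lemma toList_slash : ("/" : String).toList = ['/'] := by decide

lemma A_toList (filename : String) :
    (fileNameConv filename).toList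
      = if '/' ∈ filename.toList then chop filename.toList else [] := by
  have hsplit : PySem.Str.split? filename "/"
      = some ((psplit filename.toList []).map String.ofList) := by
    simp [PySem.Str.split?, PySem.Chars.split?, toList_slash, splitOn_spec]
  set p := psplit filename.toList [] with hp
  have hpne : p ≠ [] := psplit_ne_nil _ _
  have hdecomp : p = p.dropLast ++ [p.getLast hpne] := (List.dropLast_append_getLast hpne).symm
  have hpop : PySem.List.pop? (p.map String.ofList) (-1)
      = some (String.ofList (p.getLast hpne), p.dropLast.map String.ofList) := by
    conv_lhs => rw [hdecomp]
    rw [List.map_append, List.map_singleton]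
    exact PySem.List.pop?_last _ _
  unfold fileNameConv
  rw [hsplit]
  simp only [Option.getD_some]
  rw [hpop]
  have hslice : ∀ s : String, (PySem.Str.slice s (some 0) (some (-1))).toList = s.toList.dropLast := by
    intro s
    simp [PySem.Str.slice, PySem.Chars.slice_eq_listSlice, PySem.List.slice_zero_start,
      PySem.List.slice_to_neg_one]
  rw [hslice]
  rw [fold_toList]
  simpa using gA_spec filename.toList []

-- ===== B-side lemmas =====

lemma rfind_go_snoc_ne (cs : List Char) (c : Char) (hc : c ≠ '/') :
    ∀ j, j ≤ cs.length →
      PySem.Chars.rfind.go (cs ++ [c]) ['/'] j = PySem.Chars.rfind.go cs ['/'] j := by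
  intro j
  induction j with
  | zero =>
      intro _
      cases cs with
      | nil => simp [PySem.Chars.rfind.go, List.isPrefixOf, Ne.symm hc]
      | cons d tl => simp [PySem.Chars.rfind.go, List.isPrefixOf]
  | succ n ih =>
      intro h
      have hn : n ≤ cs.length := Nat.le_of_succ_le h
      have hdrop : List.drop (n + 1) (cs ++ [c]) = List.drop (n + 1) cs ++ [c] :=
        List.drop_append_of_le_length h
      rcases hl : List.drop (n + 1) cs with _ | ⟨d, tl⟩
      · simp [PySem.Chars.rfind.go, hdrop, hl, List.isPrefixOf, Ne.symm hc, ih hn]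
      · simp [PySem.Chars.rfind.go, hdrop, hl, List.isPrefixOf, ih hn]

lemma rfind_snoc (cs : List Char) (c : Char) :
    PySem.Chars.rfind (cs ++ [c]) ['/']
      = if c = '/' then (cs.length : Int) else PySem.Chars.rfind cs ['/'] := by
  have hdropTop : List.drop (cs.length + 1) (cs ++ [c]) = [] := by
    apply List.drop_eq_nil_of_le; simp
  have hdropLen : List.drop cs.length (cs ++ [c]) = [c] := by
    simp [List.drop_append_of_le_length (Nat.le_refl _)]
  unfold PySem.Chars.rfind
  simp only [List.length_append, List.length_singleton]
  rw [show PySem.Chars.rfind.go (cs ++ [c]) ['/'] (cs.length + 1)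
      = if ['/'].isPrefixOf (List.drop (cs.length + 1) (cs ++ [c])) then ((cs.length : Int) + 1)
        else PySem.Chars.rfind.go (cs ++ [c]) ['/'] cs.length by
    simp [PySem.Chars.rfind.go]]
  rw [hdropTop]
  simp only [List.isPrefixOf, Bool.false_eq_true, if_false]
  by_cases hc : c = '/'
  · subst hc
    cases cs with
    | nil => simp [PySem.Chars.rfind.go, List.isPrefixOf]
    | cons d tl =>
        rw [show PySem.Chars.rfind.go ((d :: tl) ++ ['/']) ['/'] (d :: tl).length
            = if ['/'].isPrefixOf (List.drop (d :: tl).length ((d :: tl) ++ ['/']))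
              then ((d :: tl).length : Int)
              else PySem.Chars.rfind.go ((d :: tl) ++ ['/']) ['/'] tl.length by
          simp [PySem.Chars.rfind.go]]
        rw [show List.drop (d :: tl).length ((d :: tl) ++ ['/']) = ['/'] by
          simp [List.drop_append_of_le_length (Nat.le_refl _)]]
        simp [List.isPrefixOf]
  · cases cs with
    | nil =>
        simp [PySem.Chars.rfind.go, List.isPrefixOf, hc, Ne.symm hc]
    | cons d tl =>
        have h1 : PySem.Chars.rfind.go (d :: (tl ++ [c])) ['/'] (tl.length + 1)
            = PySem.Chars.rfind.go (d :: (tl ++ [c])) ['/'] tl.length := by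
          have hd : List.drop (tl.length + 1) (d :: (tl ++ [c])) = [c] := by
            simp [List.drop_append_of_le_length (Nat.le_refl _)]
          simp [PySem.Chars.rfind.go, hd, List.isPrefixOf, Ne.symm hc]
        have h2 : PySem.Chars.rfind.go (d :: tl) ['/'] (tl.length + 1)
            = PySem.Chars.rfind.go (d :: tl) ['/'] tl.length := by
          have hd : List.drop (tl.length + 1) (d :: tl) = [] := by
            apply List.drop_eq_nil_of_le; simp
          simp [PySem.Chars.rfind.go, hd]
        have h3 := rfind_go_snoc_ne (d :: tl) c hc tl.length (by simp)
        simp only [List.cons_append] at h3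
        simp only [List.cons_append, List.length_cons]
        rw [h1, h3, if_neg hc, h2]

lemma chop_snoc (cs : List Char) (c : Char) :
    chop (cs ++ [c]) = if c = '/' then cs else chop cs := by
  induction cs with
  | nil => by_cases hc : c = '/' <;> simp [chop, hc]
  | cons d tl ih =>
      by_cases hc : c = '/'
      · subst hc
        simp only [List.cons_append, chop]
        rw [if_pos (by simp), ih]
        simp
      · simp only [List.cons_append, chop, ih]
        have : ('/' ∈ tl ++ [c]) ↔ ('/' ∈ tl) := by
          simp [List.mem_append, Ne.symm hc]
        by_cases hr : '/' ∈ tl <;> simp [this, hr, hc]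

lemma chop_prefix : ∀ cs : List Char, chop cs <+: cs := by
  intro cs
  induction cs with
  | nil => simp [chop]
  | cons c rest ih =>
      by_cases hr : '/' ∈ rest
      · obtain ⟨t, ht⟩ := ih
        exact ⟨t, by simp [chop, hr, ht]⟩
      · simp [chop, hr]

lemma rfind_spec : ∀ cs : List Char,
    PySem.Chars.rfind cs ['/'] = if '/' ∈ cs then ((chop cs).length : Int) else -1 := by
  intro cs
  induction cs using List.reverseRecOn with
  | nil => decide
  | append_singleton cs c ih =>
      rw [rfind_snoc, chop_snoc]
      by_cases hc : c = '/'
      · simp [hc]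
      · have : ('/' ∈ cs ++ [c]) ↔ ('/' ∈ cs) := by
          simp [List.mem_append, Ne.symm hc]
        simp [hc, this, ih]

-- ===== VERDICT (by name: the statement is the Claim_ definition above) =====
theorem fileNameConv_spec : Claim_equal_fileNameConv := by
  intro filename _
  unfold Spec_fileNameConv
  apply string_toList_inj
  rw [A_toList]
  unfold fileNameConv_alt
  rw [PySem.Str.rfind_eq, toList_slash, rfind_spec]
  by_cases h : '/' ∈ filename.toList
  · have hnneg : ((chop filename.toList).length : Int) ≠ -1 := by
      intro hx; omega
    simp only [h, if_true, hnneg, if_false]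
    rw [show (PySem.Str.slice filename none (some ((chop filename.toList).length : Int))).toList
        = List.take (chop filename.toList).length filename.toList by
      simp only [PySem.Str.slice, PySem.Chars.slice_eq_listSlice]
      rw [PySem.List.slice_to filename.toList (by positivity)]
      simp]
    exact List.prefix_iff_eq_take.mp (chop_prefix filename.toList)
  · simp [h]
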